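-- pv_equiv track=rewrite | github.com/xonevn-ai/XoneAI | src/xoneai/xoneai/cli/configuration/paths.py | env_to_config_key
-- ===== SOURCE A (Python) =====
-- from typing import List, Optional
--
-- def get_env_prefix() -> str:
--     """Get environment variable prefix."""
--     return "XONEAI_"
--
-- def env_to_config_key(env_var: str) -> Optional[str]:
--     """
--     Convert environment variable name to config key.
--
--     Example: XONEAI_OUTPUT_FORMAT -> output.format
--     """
--     prefix = get_env_prefix()
--     if not env_var.startswith(prefix):
--         return None
--
--     key = env_var[len(prefix):].lower()
--     # Convert underscores to dots for nested keys
--     # Single underscore = dot, double underscore = single underscore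
--     parts = key.split("__")
--     result_parts = []
--     for part in parts:
--         result_parts.append(part.replace("_", "."))
--     return "_".join(result_parts)
-- ===== SOURCE B (Python) =====
-- def env_to_config_key(env_var):
--     """
--     Convert environment variable name to config key.
--
--     Example: XONEAI_OUTPUT_FORMAT -> output.format
--     """
--     prefix = "XONEAI_"
--     if not env_var.startswith(prefix):
--         return None
--     s = env_var[len(prefix):].lower()
--     out = []
--     i = 0
--     n = len(s)
--     while i < n:
--         if s[i] == '_':
--             if i + 1 < n and s[i + 1] == '_':
--                 out.append('_')
--                 i += 2
--             else:
--                 out.append('.')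
--                 i += 1
--         else:
--             out.append(s[i])
--             i += 1
--     return ''.join(out)
-- ===== Notes on version B (the rewrite author's own statement) =====
-- stated objective: alternative
-- what changed: Replaced the three-pass pipeline (split on double underscore, per-part replace of underscore by dot, join with underscore) by a single left-to-right scan of the lowercased suffix with one-character lookahead that emits an underscore for a double underscore and a dot for a lone underscore.
import Mathlib
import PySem

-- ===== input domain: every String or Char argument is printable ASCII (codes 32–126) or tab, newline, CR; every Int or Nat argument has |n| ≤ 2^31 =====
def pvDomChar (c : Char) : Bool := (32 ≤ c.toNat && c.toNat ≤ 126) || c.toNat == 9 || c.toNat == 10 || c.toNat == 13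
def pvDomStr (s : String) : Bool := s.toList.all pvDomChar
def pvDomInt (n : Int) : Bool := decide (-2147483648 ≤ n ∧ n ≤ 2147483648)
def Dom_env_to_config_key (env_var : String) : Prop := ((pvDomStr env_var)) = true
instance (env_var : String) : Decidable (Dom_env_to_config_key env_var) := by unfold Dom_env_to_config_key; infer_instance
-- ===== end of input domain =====

-- B replaces A's split("__") / replace("_",".") / join("_") pipeline by a single left-to-right
-- scan with one-character lookahead (same result computed in one pass instead of three).

-- ===== PORT A =====
def env_to_config_key (env_var : String) : Option String :=
  let pfx := "XONEAI_"
  if PySem.Str.startswith env_var pfx then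
    let key := PySem.Str.lower (PySem.Str.slice env_var (some (PySem.Str.len pfx)) none)
    match PySem.Str.split? key "__" with
    | none => none   -- unreachable: the separator "__" is non-empty, so split never raises
    | some parts =>
      let result_parts := parts.foldl (fun acc part => acc ++ [PySem.Str.replace part "_" "."]) []
      some (PySem.Str.join "_" result_parts)
  else none

-- ===== PORT B =====
-- the while-loop of Source B: consume "__" -> '_', lone '_' -> '.', anything else unchanged
def pvScan : List Char → List Char
  | [] => []
  | '_' :: '_' :: rest => '_' :: pvScan rest
  | '_' :: rest => '.' :: pvScan rest
  | c :: rest => c :: pvScan rest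

def env_to_config_key_alt (env_var : String) : Option String :=
  let pfx := "XONEAI_"
  if PySem.Str.startswith env_var pfx then
    let s := PySem.Str.lower (PySem.Str.slice env_var (some (PySem.Str.len pfx)) none)
    some (String.ofList (pvScan s.toList))
  else none

-- ===== PRECONDITION & SPEC =====
def Spec_env_to_config_key (env_var : String) (out : Option String) : Prop := out = env_to_config_key_alt env_var
instance (env_var : String) (out : Option String) : Decidable (Spec_env_to_config_key env_var out) := by unfold Spec_env_to_config_key; infer_instance

-- ===== CLAIM (what is proved, stated in full; the proofs are below) =====
def Claim_equal_env_to_config_key : Prop := ∀ (env_var : String), Dom_env_to_config_key env_var → Spec_env_to_config_key env_var (env_to_config_key env_var)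

-- ===== LEMMAS AND PROOFS =====

def pvRChar (c : Char) : Char := if c = '_' then '.' else c

def pvConsHead (pre : List Char) : List (List Char) → List (List Char)
  | [] => [pre]
  | p :: ps => (pre ++ p) :: ps

-- clean structural version of split on "__"
def pvSplitUS : List Char → List (List Char)
  | [] => [[]]
  | '_' :: '_' :: r => [] :: pvSplitUS r
  | c :: r => pvConsHead [c] (pvSplitUS r)

theorem pvConsHead_ne_nil (pre : List Char) (L : List (List Char)) : pvConsHead pre L ≠ [] := by
  cases L <;> simp [pvConsHead]

theorem pvSplitUS_ne_nil (l : List Char) : pvSplitUS l ≠ [] := by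
  induction l using pvSplitUS.induct <;> simp [pvSplitUS, pvConsHead_ne_nil]

theorem pvConsHead_consHead (a b : List Char) (L : List (List Char)) :
    pvConsHead a (pvConsHead b L) = pvConsHead (a ++ b) L := by
  cases L <;> simp [pvConsHead]

theorem pvConsHead_nil (L : List (List Char)) (h : L ≠ []) : pvConsHead [] L = L := by
  cases L with
  | nil => exact absurd rfl h
  | cons p ps => simp [pvConsHead]

theorem pvSplitUS_cons (c : Char) (r : List Char)
    (h : ¬ (c = '_' ∧ ∃ t, r = '_' :: t)) :
    pvSplitUS (c :: r) = pvConsHead [c] (pvSplitUS r) := by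
  rw [pvSplitUS.eq_def]
  split
  · simp_all
  · rename_i rr heq
    exfalso
    apply h
    have h1 : c = '_' := by injection heq
    have h2 : r = '_' :: rr := by injection heq
    exact ⟨h1, rr, h2⟩
  · simp_all

theorem pv_go_split : ∀ (fuel : Nat) (l cur : List Char) (acc : List (List Char)),
    l.length ≤ fuel →
    PySem.Chars.splitOn.go ['_', '_'] fuel l cur acc
      = acc.reverse ++ pvConsHead cur.reverse (pvSplitUS l) := by
  intro fuel
  induction fuel with
  | zero =>
    intro l cur acc h
    have : l = [] := List.eq_nil_of_length_eq_zero (Nat.le_zero.mp h)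
    subst this
    simp [PySem.Chars.splitOn.go, pvSplitUS, pvConsHead]
  | succ fuel ih =>
    intro l cur acc h
    cases l with
    | nil => simp [PySem.Chars.splitOn.go, pvSplitUS, pvConsHead]
    | cons c rest =>
      have hstep : PySem.Chars.splitOn.go ['_','_'] (fuel+1) (c :: rest) cur acc
          = if (['_','_'] : List Char).isPrefixOf (c :: rest)
            then PySem.Chars.splitOn.go ['_','_'] fuel (List.drop 2 (c :: rest)) [] (cur.reverse :: acc)
            else PySem.Chars.splitOn.go ['_','_'] fuel rest (c :: cur) acc := by
        simp [PySem.Chars.splitOn.go]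
      rw [hstep]
      by_cases hp : (['_','_'] : List Char).isPrefixOf (c :: rest)
      · rw [if_pos hp]
        obtain ⟨t, ht⟩ := List.isPrefixOf_iff_prefix.mp hp
        have ht' : ('_' : Char) :: '_' :: t = c :: rest := ht
        obtain ⟨hc, hrest⟩ : c = '_' ∧ rest = '_' :: t := by
          constructor <;> injection ht'.symm
        subst hc; subst hrest
        rw [ih _ _ _ (by simp at h ⊢; omega)]
        rcases hsp : pvSplitUS t with _ | ⟨p, ps⟩
        · exact absurd hsp (pvSplitUS_ne_nil t)
        · simp [pvSplitUS, pvConsHead, hsp]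
      · rw [if_neg hp]
        rw [ih _ _ _ (Nat.le_of_succ_le_succ h)]
        have hnd : ¬ (c = '_' ∧ ∃ t, rest = '_' :: t) := by
          rintro ⟨hc, t, ht⟩
          apply hp
          subst hc; subst ht
          simp [List.isPrefixOf]
        rw [pvSplitUS_cons c rest hnd, pvConsHead_consHead]
        simp

theorem pv_splitOn_eq (l : List Char) :
    PySem.Chars.splitOn l ['_', '_'] = pvSplitUS l := by
  rw [PySem.Chars.splitOn, pv_go_split (l.length + 1) l [] [] (by omega)]
  simp [pvConsHead_nil _ (pvSplitUS_ne_nil l)]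

theorem pv_go_repl : ∀ (fuel : Nat) (l acc : List Char), l.length ≤ fuel →
    PySem.Chars.replace.go ['_'] ['.'] fuel l acc = acc.reverse ++ l.map pvRChar := by
  intro fuel
  induction fuel with
  | zero =>
    intro l acc h
    have : l = [] := List.eq_nil_of_length_eq_zero (Nat.le_zero.mp h)
    subst this
    simp [PySem.Chars.replace.go]
  | succ fuel ih =>
    intro l acc h
    cases l with
    | nil => simp [PySem.Chars.replace.go]
    | cons c t =>
      have hstep : PySem.Chars.replace.go ['_'] ['.'] (fuel+1) (c :: t) acc
          = if (['_'] : List Char).isPrefixOf (c :: t)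
            then PySem.Chars.replace.go ['_'] ['.'] fuel (List.drop 1 (c :: t)) (['.'].reverse ++ acc)
            else PySem.Chars.replace.go ['_'] ['.'] fuel t (c :: acc) := by
        simp [PySem.Chars.replace.go]
      rw [hstep]
      by_cases hc : c = '_'
      · rw [if_pos (by simp [List.isPrefixOf, hc])]
        rw [show List.drop 1 (c :: t) = t from rfl]
        rw [ih _ _ (Nat.le_of_succ_le_succ h)]
        simp [pvRChar, hc]
      · rw [if_neg (by simp [List.isPrefixOf]; exact fun hh => hc hh.symm)]
        rw [ih _ _ (Nat.le_of_succ_le_succ h)]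
        simp [pvRChar, hc]

theorem pv_replace_eq (p : List Char) :
    PySem.Chars.replace p ['_'] ['.'] = p.map pvRChar := by
  rw [PySem.Chars.replace]
  simp [pv_go_repl p.length p [] le_rfl]

theorem pv_join_cons_head (a : Char) (q : List Char) (qs : List (List Char)) :
    PySem.Chars.join ['_'] ((a :: q) :: qs) = a :: PySem.Chars.join ['_'] (q :: qs) := by
  cases qs <;> simp [PySem.Chars.join, List.intercalate]

theorem pv_join_nil_cons (q : List Char) (qs : List (List Char)) :
    PySem.Chars.join ['_'] ([] :: q :: qs) = '_' :: PySem.Chars.join ['_'] (q :: qs) := by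
  cases qs <;> simp [PySem.Chars.join, List.intercalate]

theorem pv_scan_spec (l : List Char) :
    PySem.Chars.join ['_'] ((pvSplitUS l).map (List.map pvRChar)) = pvScan l := by
  induction l using pvScan.induct with
  | case1 => simp [pvSplitUS, pvScan, PySem.Chars.join, List.intercalate]
  | case2 rest ih =>
    rcases hsp : pvSplitUS rest with _ | ⟨p, ps⟩
    · exact absurd hsp (pvSplitUS_ne_nil rest)
    · rw [show pvSplitUS ('_' :: '_' :: rest) = [] :: pvSplitUS rest from rfl, hsp]
      rw [hsp] at ih
      simp only [List.map_cons, List.map_nil] at ih ⊢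
      rw [pv_join_nil_cons, ih]
      rfl
  | case3 rest h ih =>
    have hnd : ¬ (('_' : Char) = '_' ∧ ∃ t, rest = '_' :: t) := by
      rintro ⟨_, t, ht⟩; exact h t ht
    rcases hsp : pvSplitUS rest with _ | ⟨p, ps⟩
    · exact absurd hsp (pvSplitUS_ne_nil rest)
    · rw [pvSplitUS_cons _ _ hnd, hsp]
      rw [hsp] at ih
      simp only [pvConsHead, List.singleton_append, List.map_cons] at ih ⊢
      rw [pv_join_cons_head, ih]
      have hscan : pvScan ('_' :: rest) = '.' :: pvScan rest := by
        rw [pvScan.eq_def]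
        cases rest with
        | nil => rfl
        | cons d r =>
          have hd : d ≠ '_' := fun hd => h r (by rw [hd])
          simp_all
      rw [hscan]
      simp [pvRChar]
  | case4 c rest h1 h2 ih =>
    have hc : c ≠ '_' := fun hh => h2 hh
    have hnd : ¬ (c = '_' ∧ ∃ t, rest = '_' :: t) := by
      rintro ⟨hh, _⟩; exact hc hh
    rcases hsp : pvSplitUS rest with _ | ⟨p, ps⟩
    · exact absurd hsp (pvSplitUS_ne_nil rest)
    · rw [pvSplitUS_cons _ _ hnd, hsp]
      rw [hsp] at ih
      simp only [pvConsHead, List.singleton_append, List.map_cons] at ih ⊢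
      rw [pv_join_cons_head, ih]
      have hscan : pvScan (c :: rest) = c :: pvScan rest := by
        rw [pvScan.eq_def]
        cases rest with
        | nil => simp
        | cons d r => simp
      rw [hscan]
      simp [pvRChar, hc]

theorem pv_pipeline (key : String) :
    PySem.Str.join "_"
      (((PySem.Chars.splitOn key.toList ['_', '_']).map String.ofList).foldl
        (fun acc part => acc ++ [PySem.Str.replace part "_" "."]) [])
    = String.ofList (pvScan key.toList) := by
  rw [PySem.List.foldl_append_singleton_eq_map]
  apply String.toList_inj.mp
  rw [PySem.Str.toList_join]
  simp only [List.nil_append, List.map_map]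
  have hmap : (String.toList ∘ (fun part => PySem.Str.replace part "_" ".") ∘ String.ofList)
      = fun x : List Char => x.map pvRChar := by
    funext x
    simp only [Function.comp_apply, PySem.Str.toList_replace, String.toList_ofList]
    rw [show "_".toList = ['_'] from rfl, show ".".toList = ['.'] from rfl, pv_replace_eq]
  rw [hmap, show "_".toList = ['_'] from rfl, pv_splitOn_eq, String.toList_ofList]
  exact pv_scan_spec key.toList

theorem env_to_config_key_spec : Claim_equal_env_to_config_key := by
  intro env_var _
  unfold Spec_env_to_config_key env_to_config_key env_to_config_key_alt
  simp only []
  by_cases hs : PySem.Str.startswith env_var "XONEAI_" = true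
  · rw [if_pos hs, if_pos hs]
    have hsplit : PySem.Str.split? (PySem.Str.lower (PySem.Str.slice env_var (some (PySem.Str.len "XONEAI_")) none)) "__"
        = some ((PySem.Chars.splitOn (PySem.Str.lower (PySem.Str.slice env_var (some (PySem.Str.len "XONEAI_")) none)).toList ['_','_']).map String.ofList) := by
      rw [PySem.Str.split?]
      simp [PySem.Chars.split?, show "__".toList = ['_','_'] from rfl]
    rw [hsplit]
    exact congrArg some (pv_pipeline _)
  · rw [if_neg hs, if_neg hs]
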